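-- pv_equiv track=rewrite | github.com/watson-sm/TicketFrontier-Test | TEST3/test3.py | sortByDay
-- ===== SOURCE A (Python) =====
-- def sortByDay(data):
--     # A little messy but gets job done
--     sun = []
--     mon = []
--     tue = []
--     wed = []
--     thu = []
--     fri = []
--     sat = []
--
--     for d in data:
--         if d[3] == "Sun":
--             sun.append(d)
--         if d[3] == "Mon":
--             mon.append(d)
--         if d[3] == "Tue":
--             tue.append(d)
--         if d[3] == "Wed":
--             wed.append(d)
--         if d[3] == "Thu":
--             thu.append(d)
--         if d[3] == "Fri":
--             fri.append(d)
--         if d[3] == "Sat":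
--             sat.append(d)
--
--     return sun + mon + tue + wed + thu + fri + sat
-- ===== SOURCE B (Python) =====
-- def sortByDay(data):
--     order = {"Sun": 0, "Mon": 1, "Tue": 2, "Wed": 3, "Thu": 4, "Fri": 5, "Sat": 6}
--     return sorted((d for d in data if d[3] in order), key=lambda d: order[d[3]])
-- ===== Notes on version B (the rewrite author's own statement) =====
-- stated objective: idiomatic
-- what changed: Replaced the seven explicit weekday buckets and their concatenation by a single stable sort of the weekday-labelled rows keyed on the weekday's rank in a dict.
import Mathlib
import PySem

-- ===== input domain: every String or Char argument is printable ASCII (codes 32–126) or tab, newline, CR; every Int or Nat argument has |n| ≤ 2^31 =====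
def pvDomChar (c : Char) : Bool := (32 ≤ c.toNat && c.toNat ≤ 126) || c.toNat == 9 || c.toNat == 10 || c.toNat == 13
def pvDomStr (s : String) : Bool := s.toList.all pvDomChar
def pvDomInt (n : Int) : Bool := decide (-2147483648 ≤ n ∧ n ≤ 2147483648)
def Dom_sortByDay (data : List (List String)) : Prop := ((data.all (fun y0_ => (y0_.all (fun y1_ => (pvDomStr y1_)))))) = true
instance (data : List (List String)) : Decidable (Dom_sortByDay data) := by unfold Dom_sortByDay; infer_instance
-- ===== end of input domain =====

-- B replaces A's seven weekday buckets + concatenation by one stable sort keyed on the weekday's rank (idiomatic, not faster).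

-- ===== PORT A =====
-- seven bucket lists carried as a nested tuple; d[3] is PySem.List.pyGetD d 3 "" (in range under Pre_)
def sortByDay (data : List (List String)) : List (List String) :=
  let r := data.foldl (fun s d =>
    (if PySem.List.pyGetD d 3 "" == "Sun" then s.1 ++ [d] else s.1,
     if PySem.List.pyGetD d 3 "" == "Mon" then s.2.1 ++ [d] else s.2.1,
     if PySem.List.pyGetD d 3 "" == "Tue" then s.2.2.1 ++ [d] else s.2.2.1,
     if PySem.List.pyGetD d 3 "" == "Wed" then s.2.2.2.1 ++ [d] else s.2.2.2.1,
     if PySem.List.pyGetD d 3 "" == "Thu" then s.2.2.2.2.1 ++ [d] else s.2.2.2.2.1,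
     if PySem.List.pyGetD d 3 "" == "Fri" then s.2.2.2.2.2.1 ++ [d] else s.2.2.2.2.2.1,
     if PySem.List.pyGetD d 3 "" == "Sat" then s.2.2.2.2.2.2 ++ [d] else s.2.2.2.2.2.2))
    ([], [], [], [], [], [], [])
  r.1 ++ r.2.1 ++ r.2.2.1 ++ r.2.2.2.1 ++ r.2.2.2.2.1 ++ r.2.2.2.2.2.1 ++ r.2.2.2.2.2.2

-- ===== PORT B =====
-- the weekday → rank dict
def pvOrder : PySem.Dict String Int :=
  ⟨[("Sun", 0), ("Mon", 1), ("Tue", 2), ("Wed", 3), ("Thu", 4), ("Fri", 5), ("Sat", 6)]⟩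

-- key order[d[3]]; the .getD 0 is only ever applied to rows that passed the 'd[3] in order' filter
def sortByDay_alt (data : List (List String)) : List (List String) :=
  PySem.List.sorted
    (data.filter (fun d => (PySem.Dict.get? pvOrder (PySem.List.pyGetD d 3 "")).isSome))
    (fun d => (PySem.Dict.get? pvOrder (PySem.List.pyGetD d 3 "")).getD 0) false

-- ===== PRECONDITION & SPEC =====
-- Pre_: A raises IndexError on d[3] for any row shorter than 4; exactly those inputs are excluded.
def Pre_sortByDay (data : List (List String)) : Prop := ∀ d ∈ data, 4 ≤ d.length
instance (data : List (List String)) : Decidable (Pre_sortByDay data) := by unfold Pre_sortByDay; infer_instance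
def pvWitness_sortByDay : List (List String) :=
  [["a", "b", "c", "Mon"], ["x", "y", "z", "Sun"], ["p", "q", "r", "Mon"]]

def Spec_sortByDay (data : List (List String)) (out : List (List String)) : Prop := out = sortByDay_alt data
instance (data : List (List String)) (out : List (List String)) : Decidable (Spec_sortByDay data out) := by unfold Spec_sortByDay; infer_instance

-- ===== CLAIM (what is proved, stated in full; the proofs are below) =====
def Claim_equal_sortByDay : Prop := ∀ (data : List (List String)), Dom_sortByDay data → Pre_sortByDay data → Spec_sortByDay data (sortByDay data)

-- ===== LEMMAS AND PROOFS =====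

-- pvOrder lookup in closed form
lemma get?_pvOrder (s : String) :
    PySem.Dict.get? pvOrder s =
      (if s = "Sun" then some 0 else if s = "Mon" then some 1 else if s = "Tue" then some 2
       else if s = "Wed" then some 3 else if s = "Thu" then some 4 else if s = "Fri" then some 5
       else if s = "Sat" then some 6 else none) := by
  have e : ∀ t : String, ¬ s = t → (t == s) = false := fun t ht => beq_eq_false_iff_ne.2 (fun h => ht h.symm)
  simp only [PySem.Dict.get?, pvOrder, List.find?]
  split_ifs with h1 h2 h3 h4 h5 h6 h7 <;>
    first
      | (subst_vars; rfl)
      | (simp only [e _ h1, e _ h2, e _ h3, e _ h4, e _ h5, e _ h6, e _ h7]; rfl)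

-- insertBy skips a prefix it does not go before
lemma insertBy_append_left {α : Type} (before : α → α → Bool) (x : α) (L1 L2 : List α)
    (h : ∀ y ∈ L1, before x y = false) :
    PySem.List.insertBy before x (L1 ++ L2) = L1 ++ PySem.List.insertBy before x L2 := by
  induction L1 with
  | nil => simp
  | cons y ys ih =>
    simp only [List.cons_append, PySem.List.insertBy, h y (by simp)]
    simp [ih (fun z hz => h z (by simp [hz]))]

-- insertBy goes to the front of a list it goes before everywhere
lemma insertBy_all_before {α : Type} (before : α → α → Bool) (x : α) (L : List α)
    (h : ∀ y ∈ L, before x y = true) :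
    PySem.List.insertBy before x L = x :: L := by
  cases L with
  | nil => simp [PySem.List.insertBy]
  | cons y ys => simp [PySem.List.insertBy, h y (by simp)]

-- stable sort by an Int key with values in a strictly increasing list = concatenation of the key's buckets
lemma sorted_eq_flatMap_buckets {α : Type} (k : α → Int) (vals : List Int)
    (hv : vals.Pairwise (· < ·)) (xs : List α) (hx : ∀ x ∈ xs, k x ∈ vals) :
    PySem.List.sorted xs k false = vals.flatMap (fun v => xs.filter (fun x => k x == v)) := by
  induction xs using List.reverseRecOn with
  | nil => simp [PySem.List.sorted]
  | append_singleton xs x ih =>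
    have hxs : ∀ y ∈ xs, k y ∈ vals := fun y hy => hx y (by simp [hy])
    have hkx : k x ∈ vals := hx x (by simp)
    rw [PySem.List.sorted_eq_foldl_insertBy, List.foldl_append, List.foldl_cons, List.foldl_nil,
        ← PySem.List.sorted_eq_foldl_insertBy, ih hxs]
    obtain ⟨pre, suf, hsplit⟩ := List.append_of_mem hkx
    subst hsplit
    rw [List.pairwise_append] at hv
    obtain ⟨hpre, hcs, hcross⟩ := hv
    rw [List.pairwise_cons] at hcs
    have hb : ∀ v : Int, (List.filter (fun y => k y == v) [x]) = if k x = v then [x] else [] := by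
      intro v
      by_cases h : k x = v
      · simp [h]
      · simp only [List.filter_cons, List.filter_nil]
        simp [h]
    have hmain : ∀ (S : List Int), (∀ v ∈ S, v ≠ k x) →
        S.flatMap (fun v => List.filter (fun y => k y == v) (xs ++ [x]))
          = S.flatMap (fun v => List.filter (fun y => k y == v) xs) := by
      intro S hS
      refine List.flatMap_congr (fun v hv => ?_)
      rw [List.filter_append, hb, if_neg (fun h => hS v hv h.symm)]
      simp
    have hleft : ∀ y ∈ (pre ++ [k x]).flatMap (fun v => List.filter (fun z => k z == v) xs),
        decide (k x < k y) = false := by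
      intro y hy
      simp only [List.mem_flatMap, List.mem_filter, List.mem_append, List.mem_singleton,
        beq_iff_eq] at hy
      obtain ⟨v, hvm, _, hkv⟩ := hy
      rcases hvm with hvp | hvx
      · have := hcross v hvp (k x) (by simp)
        simp only [hkv, decide_eq_false_iff_not]
        omega
      · subst hvx
        simp [hkv]
    have hright : ∀ y ∈ suf.flatMap (fun v => List.filter (fun z => k z == v) xs),
        decide (k x < k y) = true := by
      intro y hy
      simp only [List.mem_flatMap, List.mem_filter, beq_iff_eq] at hy
      obtain ⟨v, hvs, _, hkv⟩ := hy
      have := hcs.1 v hvs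
      simp only [hkv, decide_eq_true_eq]
      omega
    rw [show pre ++ k x :: suf = (pre ++ [k x]) ++ suf by simp, List.flatMap_append,
        insertBy_append_left _ _ _ _ hleft, insertBy_all_before _ _ _ hright,
        List.flatMap_append, List.flatMap_append, List.flatMap_append,
        hmain pre (fun v hvp => Int.ne_of_lt (hcross v hvp (k x) (by simp))),
        hmain suf (fun v hvs => Int.ne_of_gt (hcs.1 v hvs))]
    simp only [List.flatMap_cons, List.flatMap_nil, List.append_nil, List.filter_append, hb]
    simp

-- B's membership-and-rank test is A's string test, for each (day, rank) entry of pvOrder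
lemma test_day (s : String) (j : Int) (t : String) (hjt : (t, j) ∈ pvOrder.items) :
    (((PySem.Dict.get? pvOrder s).getD 0 == j) && (PySem.Dict.get? pvOrder s).isSome) = (s == t) := by
  rw [get?_pvOrder]
  fin_cases hjt <;> split_ifs with h1 h2 h3 h4 h5 h6 h7 <;> subst_vars <;> simp_all

-- A's loop with its seven accumulators, characterised as seven filters
lemma A_foldl (data : List (List String))
    (s0 : List (List String) × List (List String) × List (List String) × List (List String) ×
          List (List String) × List (List String) × List (List String)) :
    data.foldl (fun s d =>
      (if PySem.List.pyGetD d 3 "" == "Sun" then s.1 ++ [d] else s.1,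
       if PySem.List.pyGetD d 3 "" == "Mon" then s.2.1 ++ [d] else s.2.1,
       if PySem.List.pyGetD d 3 "" == "Tue" then s.2.2.1 ++ [d] else s.2.2.1,
       if PySem.List.pyGetD d 3 "" == "Wed" then s.2.2.2.1 ++ [d] else s.2.2.2.1,
       if PySem.List.pyGetD d 3 "" == "Thu" then s.2.2.2.2.1 ++ [d] else s.2.2.2.2.1,
       if PySem.List.pyGetD d 3 "" == "Fri" then s.2.2.2.2.2.1 ++ [d] else s.2.2.2.2.2.1,
       if PySem.List.pyGetD d 3 "" == "Sat" then s.2.2.2.2.2.2 ++ [d] else s.2.2.2.2.2.2)) s0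
    = (s0.1 ++ data.filter (fun d => PySem.List.pyGetD d 3 "" == "Sun"),
       s0.2.1 ++ data.filter (fun d => PySem.List.pyGetD d 3 "" == "Mon"),
       s0.2.2.1 ++ data.filter (fun d => PySem.List.pyGetD d 3 "" == "Tue"),
       s0.2.2.2.1 ++ data.filter (fun d => PySem.List.pyGetD d 3 "" == "Wed"),
       s0.2.2.2.2.1 ++ data.filter (fun d => PySem.List.pyGetD d 3 "" == "Thu"),
       s0.2.2.2.2.2.1 ++ data.filter (fun d => PySem.List.pyGetD d 3 "" == "Fri"),
       s0.2.2.2.2.2.2 ++ data.filter (fun d => PySem.List.pyGetD d 3 "" == "Sat")) := by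
  induction data generalizing s0 with
  | nil => simp
  | cons d data ih =>
    simp only [List.foldl_cons, ih, List.filter_cons, Prod.mk.injEq]
    refine ⟨?_, ?_, ?_, ?_, ?_, ?_, ?_⟩ <;> (split_ifs <;> simp_all)

-- ===== VERDICT (by name: the statement is the Claim_ definition above) =====
theorem sortByDay_spec : Claim_equal_sortByDay := by
  intro data _ _
  unfold Spec_sortByDay sortByDay sortByDay_alt
  have hbucket : ∀ (j : Int) (t : String), (t, j) ∈ pvOrder.items →
      List.filter (fun d => (PySem.Dict.get? pvOrder (PySem.List.pyGetD d 3 "")).getD 0 == j)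
        (List.filter (fun d => (PySem.Dict.get? pvOrder (PySem.List.pyGetD d 3 "")).isSome) data)
      = data.filter (fun d => PySem.List.pyGetD d 3 "" == t) := by
    intro j t hjt
    rw [List.filter_filter]
    exact List.filter_congr (fun d _ => test_day _ j t hjt)
  rw [sorted_eq_flatMap_buckets _ [0, 1, 2, 3, 4, 5, 6] (by decide) _ ?side]
  · simp only [List.flatMap_cons, List.flatMap_nil, List.append_nil]
    rw [hbucket 0 "Sun" (by simp [pvOrder]), hbucket 1 "Mon" (by simp [pvOrder]),
        hbucket 2 "Tue" (by simp [pvOrder]), hbucket 3 "Wed" (by simp [pvOrder]),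
        hbucket 4 "Thu" (by simp [pvOrder]), hbucket 5 "Fri" (by simp [pvOrder]),
        hbucket 6 "Sat" (by simp [pvOrder]), A_foldl]
    simp
  case side =>
    intro d hd
    simp only [List.mem_filter] at hd
    obtain ⟨-, hp⟩ := hd
    rw [get?_pvOrder] at hp ⊢
    split_ifs at hp ⊢ <;> simp_all
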